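-- pv_equiv track=rewrite | github.com/Dejke/advanced-algorithm-labs | lab2/lab2.py | make_rooted
-- ===== SOURCE A (Python) =====
-- def make_rooted(t):
--     def rec_make_rooted(v, parent):
--         t[v].remove(parent)
--         for child in t[v]:
--             rec_make_rooted(child, v)
--
--     root = list(t.keys())[0] # practically random, but deterministic
--
--     for child in t[root]:
--         rec_make_rooted(child, root)
--     return root, t
-- ===== SOURCE B (Python) =====
-- def make_rooted(t):
--     # Iterative DFS with an explicit stack of FRAMES (parent, remaining children)
--     # instead of A's recursive helper; each step either consumes the next child of
--     # the top frame (removing the parent edge and opening a new frame) or discards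
--     # an exhausted frame. t is mutated in place like A does.
--     root = next(iter(t))
--     stack = [(root, list(t[root]))]
--     while stack:
--         parent, kids = stack[-1]
--         if kids:
--             c = kids.pop(0)
--             t[c].remove(parent)
--             stack.append((c, list(t[c])))
--         else:
--             stack.pop()
--     return root, t
-- ===== Notes on version B (the rewrite author's own statement) =====
-- stated objective: alternative
-- what changed: Replaces the recursive DFS helper (which recurses per child after mutating t[v] via remove) with an iterative loop over an explicit stack of (parent, remaining-children) frames that pops the next child from the top frame, removes the parent edge, and opens a new frame; no recursion and no inner helper function.
-- outside the precondition, e.g. on make_rooted({3: [3, 3, 3]}): A returns (3, {3: []}), B raises ValueError; on make_rooted({2: [2, 2]}): A returns (2, {2: []}), B raises ValueError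
import Mathlib
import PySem

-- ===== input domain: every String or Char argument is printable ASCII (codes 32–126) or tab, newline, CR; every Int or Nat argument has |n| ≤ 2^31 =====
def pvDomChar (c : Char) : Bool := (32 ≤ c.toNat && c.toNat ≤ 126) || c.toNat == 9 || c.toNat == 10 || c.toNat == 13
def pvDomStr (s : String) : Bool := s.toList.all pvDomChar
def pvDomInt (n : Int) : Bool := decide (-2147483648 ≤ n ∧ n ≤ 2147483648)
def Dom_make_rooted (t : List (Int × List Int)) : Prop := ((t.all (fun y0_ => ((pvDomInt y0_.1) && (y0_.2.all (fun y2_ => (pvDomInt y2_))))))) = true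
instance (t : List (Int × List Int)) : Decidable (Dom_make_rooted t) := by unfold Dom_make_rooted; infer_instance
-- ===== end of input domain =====

-- B replaces A's recursive DFS helper with an iterative loop over an explicit stack of
-- (parent, remaining-children) frames; both versions mutate t in place in Python, the
-- theorems here are about the returned value.

-- ===== PORT A =====

-- total number of neighbour-list entries; each t[v].remove(parent) deletes exactly one, so it
-- bounds the recursion depth: fuel := pvMeasure + 1 is sufficient and is never exhausted.
def pvMeasure (d : PySem.Dict Int (List Int)) : Nat :=
  (d.items.map (fun p => p.2.length)).sum

-- rec_make_rooted(v, parent): t[v].remove(parent); for child in t[v]: rec_make_rooted(child, v)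
-- none = the Python raised (KeyError / ValueError) — those inputs lie outside Pre_.
-- The loop iterates over the snapshot of t[v] taken just after the removal; Python iterates the
-- live list, which is exact on Pre_ (a vertex is never revisited there, so t[v] is not mutated
-- again during its own loop).
def pvRecA : Nat → Int → Int → PySem.Dict Int (List Int) → Option (PySem.Dict Int (List Int))
  | 0, _, _, _ => none
  | f + 1, v, parent, d =>
    match d.get? v with
    | none => none                              -- KeyError
    | some l =>
      match PySem.List.remove? l parent with
      | none => none                            -- ValueError
      | some l' =>
        (d.insert v l' |> fun d' =>
          l'.foldl (fun od child => od.bind (fun dd => pvRecA f child v dd)) (some d'))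

def make_rooted (t : List (Int × List Int)) : Int × (List (Int × List Int)) :=
  let d : PySem.Dict Int (List Int) := PySem.Dict.mk t
  match PySem.List.pyGet? d.keys 0 with         -- root = list(t.keys())[0]; IndexError on {} (outside Pre_)
  | none => (0, t)
  | some root =>
    match (d.getD root []).foldl
        (fun od child => od.bind (fun dd => pvRecA (pvMeasure d + 1) child root dd)) (some d) with
    | none => (root, t)                         -- Python raised: outside Pre_
    | some d' => (root, d'.items)

-- ===== PORT B =====

-- one 'while' iteration per fuel unit; a frame (parent, kids) is Source B's stack entry.
-- The top frame either yields its next child c (t[c].remove(parent), then a new frame for c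
-- is opened) or, when exhausted, is discarded.  none = the Python raised (outside Pre_).
def pvFrames : Nat → List (Int × List Int) → PySem.Dict Int (List Int) →
    Option (PySem.Dict Int (List Int))
  | _, [], d => some d
  | 0, _ :: _, _ => none
  | g + 1, (parent, kids) :: rest, d =>
    match kids with
    | [] => pvFrames g rest d                   -- stack.pop(): frame exhausted
    | c :: kids' =>                             -- c = kids.pop(0)
      ((d.get? c).bind (fun l => PySem.List.remove? l parent)).elim none (fun l' =>
        pvFrames g ((c, l') :: (parent, kids') :: rest) (d.insert c l'))

def make_rooted_alt (t : List (Int × List Int)) : Int × (List (Int × List Int)) :=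
  let d : PySem.Dict Int (List Int) := PySem.Dict.mk t
  match d.keys with                             -- root = next(iter(t)); StopIteration on {} (outside Pre_)
  | [] => (0, t)
  | root :: _ =>
    (pvFrames (2 * pvMeasure d + 2) [(root, d.getD root [])] d).elim
      (root, t)                                 -- Python raised: outside Pre_
      (fun d' => (root, d'.items))

-- ===== PRECONDITION & SPEC =====

-- Pre_: the dicts on which the Python A returns normally and on which B returns the same value —
-- t is non-empty with distinct keys and EITHER the root's list is exactly [root] (the degenerate
-- self-loop, which A and B both reduce to []) OR the component of the first key (its reachable
-- set R) is an undirected tree: every vertex of R is a key with a duplicate-free, self-loop-free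
-- neighbour list, edges inside R are symmetric, and R carries |R| - 1 edges.  Excluded inputs on
-- which A still returns are multigraph corners (e.g. repeated or self-loop edges beyond that
-- degenerate case) where A only returns because it iterates the live list it is mutating; B's
-- stack run raises ValueError there.  Duplicate keys cannot come from a Python dict at all.
def Pre_make_rooted (t : List (Int × List Int)) : Prop :=
  t ≠ [] ∧
  (t.map Prod.fst).Nodup ∧
  ((PySem.Dict.mk t).getD t.headI.1 [] = [t.headI.1] ∨
  (fun adj R =>
    (∀ v ∈ R, v ∈ t.map Prod.fst ∧ (adj v).Nodup ∧ v ∉ adj v ∧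
      ∀ c ∈ adj v, c ∈ t.map Prod.fst ∧ v ∈ adj c) ∧
    (R.map (fun v => (adj v).length)).sum = 2 * (R.length - 1))
  (fun v => (PySem.Dict.mk t).getD v [])
  ((fun R => (R ++ R.flatMap (fun v => (PySem.Dict.mk t).getD v [])).dedup)^[t.length]
    [t.headI.1]))

instance (t : List (Int × List Int)) : Decidable (Pre_make_rooted t) := by
  unfold Pre_make_rooted; infer_instance

def pvWitness_make_rooted : (List (Int × List Int)) := [(1, [2]), (2, [1])]

def Spec_make_rooted (t : List (Int × List Int)) (out : Int × (List (Int × List Int))) : Prop := out = make_rooted_alt t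
instance (t : List (Int × List Int)) (out : Int × (List (Int × List Int))) : Decidable (Spec_make_rooted t out) := by unfold Spec_make_rooted; infer_instance

-- ===== CLAIM (what is proved, stated in full; the proofs are below) =====
def Claim_equal_make_rooted : Prop := ∀ (t : List (Int × List Int)), Dom_make_rooted t → Pre_make_rooted t → Spec_make_rooted t (make_rooted t)

-- ===== LEMMAS AND PROOFS =====

theorem make_rooted_witness_ok :
    Dom_make_rooted pvWitness_make_rooted ∧ Pre_make_rooted pvWitness_make_rooted := by
  decide

-- A's recursion applied to a worklist of (vertex, parent) pairs, left to right.
def pvRecList (f : Nat) (S : List (Int × Int)) (od : Option (PySem.Dict Int (List Int))) :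
    Option (PySem.Dict Int (List Int)) :=
  S.foldl (fun od vp => od.bind (fun dd => pvRecA f vp.1 vp.2 dd)) od

-- a frame stack read as the worklist of (child, parent) pairs it still has to process
def pvExpand (frames : List (Int × List Int)) : List (Int × Int) :=
  frames.flatMap (fun fr => fr.2.map (fun c => (c, fr.1)))

theorem pvFoldBind_none {α : Type} (g : α → PySem.Dict Int (List Int) → Option (PySem.Dict Int (List Int)))
    (l : List α) : l.foldl (fun od c => od.bind (g c)) none = none := by
  induction l with
  | nil => rfl
  | cons c l ih => simpa using ih

theorem pvRecList_cons (f : Nat) (v p : Int) (S : List (Int × Int)) (d : PySem.Dict Int (List Int)) :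
    pvRecList f ((v, p) :: S) (some d) = pvRecList f S (pvRecA f v p d) := rfl

theorem pvRecList_append (f : Nat) (S₁ S₂ : List (Int × Int)) (od : Option (PySem.Dict Int (List Int))) :
    pvRecList f (S₁ ++ S₂) od = pvRecList f S₂ (pvRecList f S₁ od) := by
  simp [pvRecList, List.foldl_append]

theorem pvLength_le_measure (d : PySem.Dict Int (List Int)) (v : Int) (l : List Int)
    (h : d.get? v = some l) : l.length ≤ pvMeasure d := by
  have hm : (v, l) ∈ d.items := PySem.Dict.mem_items_of_get?_eq_some d h
  have : l.length ∈ d.items.map (fun p => p.2.length) :=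
    List.mem_map.mpr ⟨(v, l), hm, rfl⟩
  exact List.single_le_sum (fun _ _ => Nat.zero_le _) _ this

theorem pvSum_map_replace (v : Int) (l l' : List Int) :
    ∀ (xs : List (Int × List Int)), (xs.map Prod.fst).Nodup → (v, l) ∈ xs →
    ((xs.map (fun p => if (p.1 == v) = true then (v, l') else p)).map (fun p => p.2.length)).sum
        + l.length
      = (xs.map (fun p => p.2.length)).sum + l'.length := by
  intro xs
  induction xs with
  | nil => intro _ h; cases h
  | cons x xs ih =>
    intro hnd hmem
    rw [List.map_cons] at hnd
    have hnd' : (xs.map Prod.fst).Nodup := (List.nodup_cons.mp hnd).2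
    have hx1 : x.1 ∉ xs.map Prod.fst := (List.nodup_cons.mp hnd).1
    rcases List.mem_cons.mp hmem with h | h
    · subst h
      have hxs : xs.map (fun p => if (p.1 == v) = true then (v, l') else p) = xs := by
        conv_rhs => rw [← List.map_id xs]
        apply List.map_congr_left
        intro p hp
        have hne : ¬ ((p.1 == v) = true) := by
          intro hb
          exact hx1 (List.mem_map.mpr ⟨p, hp, by simpa using (eq_of_beq hb)⟩)
        simp [hne]
      simp only [List.map_cons, hxs]
      simp
      omega
    · have hx : ¬ ((x.1 == v) = true) := by
        intro hb
        have hv : v ∈ xs.map Prod.fst := List.mem_map.mpr ⟨(v, l), h, rfl⟩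
        exact hx1 ((eq_of_beq hb) ▸ hv)
      have hih := ih hnd' h
      simp only [List.map_cons, List.sum_cons]
      rw [if_neg hx]
      omega

theorem pvMeasure_insert (d : PySem.Dict Int (List Int)) (v : Int) (l l' : List Int)
    (hnd : d.keys.Nodup) (h : d.get? v = some l) :
    pvMeasure (d.insert v l') + l.length = pvMeasure d + l'.length := by
  have hc : d.contains v = true := by
    rw [PySem.Dict.contains_eq_isSome_get?, h]; rfl
  have hm : (v, l) ∈ d.items := PySem.Dict.mem_items_of_get?_eq_some d h
  have hkeys : (d.items.map Prod.fst).Nodup := hnd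
  unfold pvMeasure
  rw [PySem.Dict.items_insert_of_contains d l' hc]
  exact pvSum_map_replace v l l' d.items hkeys hm

theorem pvRemove?_length {l l' : List Int} {p : Int}
    (h : PySem.List.remove? l p = some l') : l'.length + 1 = l.length := by
  have hp : p ∈ l := by
    by_contra hnp
    rw [(PySem.List.remove?_eq_none_iff l p).mpr hnp] at h; cases h
  rw [PySem.List.remove?_eq_some_erase l p hp] at h
  cases h
  simpa [List.length_erase, hp] using Nat.succ_pred_eq_of_pos (List.length_pos_of_mem hp) |>.symm ▸ rfl

-- one removal step: measure drops by exactly one, keys unchanged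
theorem pvStep_facts (d : PySem.Dict Int (List Int)) (v p : Int) (l l' : List Int)
    (hnd : d.keys.Nodup) (hget : d.get? v = some l) (hrem : PySem.List.remove? l p = some l') :
    pvMeasure (d.insert v l') + 1 = pvMeasure d ∧ (d.insert v l').keys = d.keys := by
  have hc : d.contains v = true := by
    rw [PySem.Dict.contains_eq_isSome_get?, hget]; rfl
  have hlen := pvRemove?_length hrem
  have hins := pvMeasure_insert d v l l' hnd hget
  refine ⟨by omega, PySem.Dict.keys_insert_of_contains d l' hc⟩

theorem pvFoldBind_pres {α : Type}
    (g : α → PySem.Dict Int (List Int) → Option (PySem.Dict Int (List Int)))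
    (hg : ∀ c d d₂, d.keys.Nodup → g c d = some d₂ →
        pvMeasure d₂ ≤ pvMeasure d ∧ d₂.keys = d.keys) :
    ∀ (l : List α) (d d₂ : PySem.Dict Int (List Int)), d.keys.Nodup →
      l.foldl (fun od c => od.bind (g c)) (some d) = some d₂ →
      pvMeasure d₂ ≤ pvMeasure d ∧ d₂.keys = d.keys := by
  intro l
  induction l with
  | nil => intro d d₂ _ h; cases h; exact ⟨le_refl _, rfl⟩
  | cons c l ih =>
    intro d d₂ hnd h
    simp only [List.foldl_cons, Option.bind_some] at h
    cases hgc : g c d with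
    | none => rw [hgc, pvFoldBind_none] at h; cases h
    | some d₁ =>
      rw [hgc] at h
      obtain ⟨h1, h1k⟩ := hg c d d₁ hnd hgc
      obtain ⟨h2, h2k⟩ := ih d₁ d₂ (h1k ▸ hnd) h
      exact ⟨le_trans h2 h1, h2k.trans h1k⟩

theorem pvRecA_pres : ∀ (f : Nat) (v p : Int) (d d₂ : PySem.Dict Int (List Int)),
    d.keys.Nodup → pvRecA f v p d = some d₂ →
    pvMeasure d₂ ≤ pvMeasure d ∧ d₂.keys = d.keys := by
  intro f
  induction f with
  | zero => intro v p d d₂ _ h; cases h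
  | succ f ih =>
    intro v p d d₂ hnd h
    unfold pvRecA at h
    cases hget : d.get? v with
    | none => simp [hget] at h
    | some l =>
      simp only [hget] at h
      cases hrem : PySem.List.remove? l p with
      | none => simp [hrem] at h
      | some l' =>
        simp only [hrem] at h
        obtain ⟨hm, hk⟩ := pvStep_facts d v p l l' hnd hget hrem
        obtain ⟨h2, h2k⟩ :=
          pvFoldBind_pres (fun c dd => pvRecA f c v dd)
            (fun c dd dd₂ hnd' hh => ih c v dd dd₂ hnd' hh)
            l' (d.insert v l') d₂ (hk ▸ hnd) h
        exact ⟨by omega, h2k.trans hk⟩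

theorem pvFoldBind_congr {α : Type} (m : Nat)
    (g₁ g₂ : α → PySem.Dict Int (List Int) → Option (PySem.Dict Int (List Int)))
    (pres : ∀ c d d₂, d.keys.Nodup → g₁ c d = some d₂ →
        pvMeasure d₂ ≤ pvMeasure d ∧ d₂.keys = d.keys)
    (hcong : ∀ c d, d.keys.Nodup → pvMeasure d ≤ m → g₁ c d = g₂ c d) :
    ∀ (l : List α) (d : PySem.Dict Int (List Int)), d.keys.Nodup → pvMeasure d ≤ m →
      l.foldl (fun od c => od.bind (g₁ c)) (some d)
        = l.foldl (fun od c => od.bind (g₂ c)) (some d) := by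
  intro l
  induction l with
  | nil => intro d _ _; rfl
  | cons c l ih =>
    intro d hnd hm
    simp only [List.foldl_cons, Option.bind_some]
    rw [← hcong c d hnd hm]
    cases hgc : g₁ c d with
    | none => rw [pvFoldBind_none, pvFoldBind_none]
    | some d₁ =>
      obtain ⟨h1, h1k⟩ := pres c d d₁ hnd hgc
      exact ih d₁ (h1k ▸ hnd) (le_trans h1 hm)

theorem pvRecA_fuel : ∀ (n : Nat) (d : PySem.Dict Int (List Int)), d.keys.Nodup →
    pvMeasure d ≤ n → ∀ (v p : Int) (f g : Nat), n < f → n < g →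
    pvRecA f v p d = pvRecA g v p d := by
  intro n
  induction n using Nat.strong_induction_on with
  | _ n IH =>
    intro d hnd hm v p f g hf hg
    obtain ⟨f, rfl⟩ : ∃ f', f = f' + 1 := ⟨f - 1, by omega⟩
    obtain ⟨g, rfl⟩ : ∃ g', g = g' + 1 := ⟨g - 1, by omega⟩
    unfold pvRecA
    cases hget : d.get? v with
    | none => simp
    | some l =>
      dsimp only
      cases hrem : PySem.List.remove? l p with
      | none => simp
      | some l' =>
        dsimp only
        have hlen := pvRemove?_length hrem
        have hlm := pvLength_le_measure d v l hget
        have hl1 : 1 ≤ l.length := by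
          have hp : p ∈ l := by
            by_contra hnp
            rw [(PySem.List.remove?_eq_none_iff l p).mpr hnp] at hrem; cases hrem
          exact List.length_pos_of_mem hp
        have hn1 : 1 ≤ n := by omega
        obtain ⟨hm', hk⟩ := pvStep_facts d v p l l' hnd hget hrem
        exact pvFoldBind_congr (n - 1)
          (fun c dd => pvRecA f c v dd) (fun c dd => pvRecA g c v dd)
          (fun c dd dd₂ hnd' hh => pvRecA_pres f c v dd dd₂ hnd' hh)
          (fun c dd hnd' hm'' => IH (n - 1) (by omega) dd hnd' hm'' c v f g (by omega) (by omega))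
          l' (d.insert v l') (hk ▸ hnd) (by omega)

theorem pvRecList_fuel (m : Nat) (S : List (Int × Int)) (d : PySem.Dict Int (List Int))
    (hnd : d.keys.Nodup) (hm : pvMeasure d ≤ m) (f g : Nat) (hf : m < f) (hg : m < g) :
    pvRecList f S (some d) = pvRecList g S (some d) := by
  unfold pvRecList
  exact pvFoldBind_congr m
    (fun vp dd => pvRecA f vp.1 vp.2 dd) (fun vp dd => pvRecA g vp.1 vp.2 dd)
    (fun vp dd dd₂ hnd' hh => pvRecA_pres f vp.1 vp.2 dd dd₂ hnd' hh)
    (fun vp dd hnd' hm' => pvRecA_fuel m dd hnd' (le_trans hm' (le_refl m)) vp.1 vp.2 f g hf hg)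
    S d hnd hm

-- the bisimulation: B's frame-stack run equals A's recursive run on the expanded worklist.
-- Potential: each while-iteration either removes an edge (measure − 1, one frame opened) or
-- discards a frame, so 2 * measure + #frames strictly decreases; fuel beyond it never runs out.
theorem pvFrames_eq_recList : ∀ (n : Nat) (d : PySem.Dict Int (List Int)), d.keys.Nodup →
    2 * pvMeasure d + 0 ≤ n → ∀ (frames : List (Int × List Int)) (f g : Nat),
    2 * pvMeasure d + frames.length ≤ n → pvMeasure d < f → n < g →
    pvFrames g frames d = pvRecList f (pvExpand frames) (some d) := by
  intro n
  induction n using Nat.strong_induction_on with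
  | _ n IH =>
    intro d hnd _ frames f g hn hf hg
    cases frames with
    | nil =>
      cases g with
      | zero => rfl
      | succ g => rfl
    | cons fr rest =>
      obtain ⟨parent, kids⟩ := fr
      obtain ⟨g, rfl⟩ : ∃ g', g = g' + 1 := ⟨g - 1, by omega⟩
      cases kids with
      | nil =>
        have hn' : 2 * pvMeasure d + (rest.length + 1) ≤ n := by simpa using hn
        show pvFrames g rest d = _
        rw [IH (n - 1) (by omega) d hnd (by omega) rest f g (by omega) hf (by omega)]
        simp [pvExpand]
      | cons c kids' =>
        show ((d.get? c).bind (fun l => PySem.List.remove? l parent)).elim none _ = _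
        have hexp : pvExpand ((parent, c :: kids') :: rest)
            = (c, parent) :: (kids'.map (fun x => (x, parent)) ++ pvExpand rest) := by
          simp [pvExpand]
        rw [hexp, pvRecList_cons]
        obtain ⟨f, rfl⟩ : ∃ f', f = f' + 1 := ⟨f - 1, by omega⟩
        cases hget : d.get? c with
        | none =>
          simp only [Option.bind_none, Option.elim]
          rw [show pvRecA (f + 1) c parent d = none by simp only [pvRecA, hget]]
          simp [pvRecList, pvFoldBind_none]
        | some l =>
          cases hrem : PySem.List.remove? l parent with
          | none =>
            simp only [Option.bind_some, hrem, Option.elim]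
            rw [show pvRecA (f + 1) c parent d = none by simp only [pvRecA, hget, hrem]]
            simp [pvRecList, pvFoldBind_none]
          | some l' =>
            simp only [Option.bind_some, hrem, Option.elim]
            have hlen := pvRemove?_length hrem
            have hlm := pvLength_le_measure d c l hget
            have hn' : 2 * pvMeasure d + (rest.length + 1) ≤ n := by simpa using hn
            obtain ⟨hm', hk⟩ := pvStep_facts d c parent l l' hnd hget hrem
            have hnd' : (d.insert c l').keys.Nodup := hk ▸ hnd
            -- left side by the induction hypothesis (potential dropped by ≥ 1)
            rw [IH (n - 1) (by omega) (d.insert c l') hnd' (by omega)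
              ((c, l') :: (parent, kids') :: rest) (f + 1) g
              (by simp; omega) (by omega) (by omega)]
            -- right side: unfold A's recursion head and refold it as a worklist run
            have hstep : pvRecA (f + 1) c parent d
                = l'.foldl (fun od child => od.bind (fun dd => pvRecA f child c dd))
                    (some (d.insert c l')) := by
              simp only [pvRecA, hget, hrem]
            have h1 : pvRecList f (l'.map (fun x => (x, c))) (some (d.insert c l'))
                = l'.foldl (fun od child => od.bind (fun dd => pvRecA f child c dd))
                    (some (d.insert c l')) := by
              unfold pvRecList; rw [List.foldl_map]
            have hfuel : pvRecList f (l'.map (fun x => (x, c))) (some (d.insert c l'))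
                = pvRecList (f + 1) (l'.map (fun x => (x, c))) (some (d.insert c l')) :=
              pvRecList_fuel (pvMeasure (d.insert c l')) _ _ hnd' (le_refl _)
                f (f + 1) (by omega) (by omega)
            have hexp2 : pvExpand ((c, l') :: (parent, kids') :: rest)
                = l'.map (fun x => (x, c))
                  ++ (kids'.map (fun x => (x, parent)) ++ pvExpand rest) := by
              simp [pvExpand]
            rw [hexp2, pvRecList_append, hstep, ← h1, hfuel]

-- ===== VERDICT (by name: the statement is the Claim_ definition above) =====
theorem make_rooted_spec : Claim_equal_make_rooted := by
  intro t _hdom hpre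
  unfold Spec_make_rooted make_rooted make_rooted_alt
  simp only
  have hnd : (PySem.Dict.mk t).keys.Nodup := by
    rw [PySem.Dict.keys_mk]
    exact hpre.2.1
  cases hkeys : (PySem.Dict.mk t).keys with
  | nil => simp [PySem.List.pyGet?]
  | cons root ks =>
    simp only [PySem.List.pyGet?_zero_cons]
    have hmain := pvFrames_eq_recList (2 * pvMeasure (PySem.Dict.mk t) + 1) (PySem.Dict.mk t)
      hnd (by omega) [(root, (PySem.Dict.mk t).getD root [])]
      (pvMeasure (PySem.Dict.mk t) + 1) (2 * pvMeasure (PySem.Dict.mk t) + 2)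
      (by simp) (by omega) (by omega)
    have hA : ((PySem.Dict.mk t).getD root []).foldl
        (fun od child => od.bind (fun dd =>
          pvRecA (pvMeasure (PySem.Dict.mk t) + 1) child root dd)) (some (PySem.Dict.mk t))
        = pvRecList (pvMeasure (PySem.Dict.mk t) + 1)
            (pvExpand [(root, (PySem.Dict.mk t).getD root [])])
            (some (PySem.Dict.mk t)) := by
      unfold pvRecList
      simp only [pvExpand, List.flatMap_cons, List.flatMap_nil, List.append_nil]
      rw [List.foldl_map]
    rw [hA, ← hmain]
    cases pvFrames (2 * pvMeasure (PySem.Dict.mk t) + 2)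
        [(root, (PySem.Dict.mk t).getD root [])] (PySem.Dict.mk t) with
    | none => rfl
    | some d' => rfl
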